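-- pv_equiv track=rewrite | github.com/vectorpikachu/verus-proof-synthesis | code/utils.py | compress_nl_assertion
-- ===== SOURCE A (Python) =====
-- def compress_nl_assertion(code):
--     lines = code.split("\n")
--     inside = False
--     tmp_line = ""
--     new_code = ""
--     for line in lines:
--         if not inside:
--             if line.strip().startswith("assert") and "by" in line and "nonlinear_arith" in line:
--                 inside = True
--                 tmp_line += line
--             else:
--                 new_code += line + "\n"
--         else:
--             if "{}" in line:
--                 tmp_line += " " + line.strip() + "\n"
--                 inside = False
--                 new_code += tmp_line
--                 tmp_line = ""
--             else:
--                 tmp_line += " " + line.strip()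
--     return new_code
-- ===== SOURCE B (Python) =====
-- def compress_nl_assertion(code):
--     lines = code.split("\n")
--     n = len(lines)
--
--     def is_opener(l):
--         return l.strip().startswith("assert") and "by" in l and "nonlinear_arith" in l
--
--     # Stage 1: parse the lines into a list of segments -- either a plain line,
--     # or an assertion block (opener line, the following lines up to and
--     # including the '{}' closer, and whether it was actually closed).
--     segs = []
--     i = 0
--     while i < n:
--         l = lines[i]
--         if is_opener(l):
--             j = i + 1
--             while j < n and "{}" not in lines[j]:
--                 j += 1
--             closed = j < n
--             segs.append(("block", l, lines[i + 1:j + 1], closed))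
--             i = j + 1
--         else:
--             segs.append(("line", l))
--             i += 1
--
--     # Stage 2: render the segments. A block left open at end-of-file renders
--     # to nothing (the original drops such a block too).
--     pieces = []
--     for seg in segs:
--         if seg[0] == "line":
--             pieces.append(seg[1] + "\n")
--         elif seg[3]:
--             pieces.append(seg[1] + "".join(" " + x.strip() for x in seg[2]) + "\n")
--     return "".join(pieces)
-- ===== Notes on version B (the rewrite author's own statement) =====
-- stated objective: alternative
-- what changed: Replaces A's single-pass inside-flag state machine with string accumulators by a parse-then-render pipeline: stage 1 builds an intermediate list of segments (plain lines / assertion blocks with their consumed lines and a closed flag), stage 2 renders the segments and joins the pieces.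
import Mathlib
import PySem

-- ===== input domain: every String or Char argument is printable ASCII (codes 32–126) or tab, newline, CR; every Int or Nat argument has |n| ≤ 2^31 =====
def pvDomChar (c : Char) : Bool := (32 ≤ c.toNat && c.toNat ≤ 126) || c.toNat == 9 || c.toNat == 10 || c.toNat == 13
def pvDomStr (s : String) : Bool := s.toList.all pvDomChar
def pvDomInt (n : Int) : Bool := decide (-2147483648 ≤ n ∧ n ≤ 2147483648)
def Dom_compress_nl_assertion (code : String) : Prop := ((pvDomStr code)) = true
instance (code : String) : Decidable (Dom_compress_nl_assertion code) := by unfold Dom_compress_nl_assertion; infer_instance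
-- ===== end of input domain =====

-- B replaces A's single-pass inside-flag state machine by a parse-then-render pipeline
-- (segments as an intermediate structure); same return value everywhere (objective: alternative).

-- ===== PORT A =====
-- strings are handled at the PySem.Chars (List Char) level, exact for Python str here
def aOpener (line : List Char) : Bool :=
  PySem.Chars.startswith (PySem.Chars.strip line) "assert".toList
    && PySem.Chars.isIn "by".toList line
    && PySem.Chars.isIn "nonlinear_arith".toList line

-- the for-loop of A over (inside, tmp_line, new_code)
def aLoop : List (List Char) → Bool → List Char → List Char → List Char
  | [], _, _, new_code => new_code
  | line :: rest, inside, tmp_line, new_code =>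
    if !inside then
      if aOpener line then
        aLoop rest true (tmp_line ++ line) new_code
      else
        aLoop rest false tmp_line (new_code ++ line ++ ['\n'])
    else
      if PySem.Chars.isIn "{}".toList line then
        aLoop rest false [] (new_code ++ (tmp_line ++ [' '] ++ PySem.Chars.strip line ++ ['\n']))
      else
        aLoop rest true (tmp_line ++ [' '] ++ PySem.Chars.strip line) new_code

def compress_nl_assertion (code : String) : String :=
  String.ofList (aLoop (PySem.Chars.splitOn code.toList ['\n']) false [] [])

-- ===== PORT B =====
def bOpener (line : List Char) : Bool :=
  PySem.Chars.startswith (PySem.Chars.strip line) "assert".toList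
    && PySem.Chars.isIn "by".toList line
    && PySem.Chars.isIn "nonlinear_arith".toList line

-- a parsed segment: a plain line, or an assertion block
-- (opener line, the following lines up to and including the '{}' closer, closed flag)
inductive BSeg where
  | plain : List Char → BSeg
  | block : List Char → List (List Char) → Bool → BSeg
deriving DecidableEq, Repr

-- the inner index scan of stage 1: split off the lines up to and including the
-- first line containing "{}"; third component says whether such a line was found
def bSplitClose : List (List Char) → List (List Char) × List (List Char) × Bool
  | [] => ([], [], false)
  | cur :: rest =>
    if PySem.Chars.isIn "{}".toList cur then ([cur], rest, true)
    else
      let r := bSplitClose rest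
      (cur :: r.1, r.2.1, r.2.2)

theorem bSplitClose_len (ls : List (List Char)) :
    (bSplitClose ls).2.1.length ≤ ls.length := by
  induction ls with
  | nil => simp [bSplitClose]
  | cons cur rest ih =>
    simp only [bSplitClose]
    split
    · simp
    · simpa using Nat.le_succ_of_le ih

-- stage 1: parse the lines into segments
def bParse : List (List Char) → List BSeg
  | [] => []
  | l :: rest =>
    if bOpener l then
      let r := bSplitClose rest
      BSeg.block l r.1 r.2.2 :: (if r.2.2 then bParse r.2.1 else [])
    else
      BSeg.plain l :: bParse rest
termination_by ls => ls.length
decreasing_by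
  · exact Nat.lt_succ_of_le (bSplitClose_len rest)
  · simp

-- stage 2: render the segments into pieces (an open block renders to nothing)
def bPieces : List BSeg → List (List Char)
  | [] => []
  | BSeg.plain l :: t => (l ++ ['\n']) :: bPieces t
  | BSeg.block op inner closed :: t =>
    if closed then
      (op ++ PySem.Chars.join [] (inner.map (fun x => ' ' :: PySem.Chars.strip x)) ++ ['\n'])
        :: bPieces t
    else bPieces t

def compress_nl_assertion_alt (code : String) : String :=
  String.ofList (PySem.Chars.join []
    (bPieces (bParse (PySem.Chars.splitOn code.toList ['\n']))))

-- ===== PRECONDITION & SPEC =====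
def Spec_compress_nl_assertion (code : String) (out : String) : Prop := out = compress_nl_assertion_alt code
instance (code : String) (out : String) : Decidable (Spec_compress_nl_assertion code out) := by unfold Spec_compress_nl_assertion; infer_instance

-- ===== CLAIM (what is proved, stated in full; the proofs are below) =====
def Claim_equal_compress_nl_assertion : Prop := ∀ (code : String), Dom_compress_nl_assertion code → Spec_compress_nl_assertion code (compress_nl_assertion code)

-- ===== LEMMAS AND PROOFS =====

theorem join0_cons (a : List Char) (t : List (List Char)) :
    PySem.Chars.join [] (a :: t) = a ++ PySem.Chars.join [] t := by
  cases t with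
  | nil => rw [PySem.Chars.join_singleton, PySem.Chars.join_nil]; simp
  | cons b t' => rw [PySem.Chars.join_cons_cons]; simp

-- A's inside-state run equals stage 1's close-splitting
theorem aLoop_inside (ls : List (List Char)) :
    ∀ (tmp new : List Char),
      aLoop ls true tmp new =
        if (bSplitClose ls).2.2 then
          aLoop (bSplitClose ls).2.1 false []
            (new ++ tmp ++
              PySem.Chars.join [] ((bSplitClose ls).1.map (fun x => ' ' :: PySem.Chars.strip x))
              ++ ['\n'])
        else new := by
  induction ls with
  | nil => intro tmp new; simp [aLoop, bSplitClose]
  | cons cur rest ih =>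
    intro tmp new
    simp only [aLoop, bSplitClose, Bool.not_true, Bool.false_eq_true, reduceIte]
    cases hcl : PySem.Chars.isIn "{}".toList cur with
    | true =>
      simp only [reduceIte, List.map_cons, List.map_nil, PySem.Chars.join_singleton]
      simp
    | false =>
      simp only [Bool.false_eq_true, reduceIte]
      rw [ih]
      cases hcd : (bSplitClose rest).2.2 with
      | true =>
        simp only [reduceIte, List.map_cons, join0_cons]
        simp
      | false => simp

theorem main_loop :
    ∀ (n : ℕ) (ls : List (List Char)), ls.length ≤ n → ∀ (new : List Char),
      aLoop ls false [] new = new ++ PySem.Chars.join [] (bPieces (bParse ls)) := by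
  intro n
  induction n with
  | zero =>
    intro ls h new
    have : ls = [] := List.length_eq_zero_iff.mp (Nat.le_zero.mp h)
    subst this; simp [aLoop, bParse, bPieces, PySem.Chars.join_nil]
  | succ n ih =>
    intro ls h new
    cases ls with
    | nil => simp [aLoop, bParse, bPieces, PySem.Chars.join_nil]
    | cons line rest =>
      have hr : rest.length ≤ n := by simp at h; omega
      cases hop : aOpener line with
      | true =>
        have hop' : bOpener line = true := hop
        simp only [aLoop, hop, Bool.not_false, reduceIte, List.nil_append]
        rw [aLoop_inside]
        simp only [bParse, hop', reduceIte]
        cases hcd : (bSplitClose rest).2.2 with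
        | true =>
          have hlt : (bSplitClose rest).2.1.length ≤ n :=
            le_trans (bSplitClose_len rest) hr
          simp only [reduceIte, bPieces, join0_cons]
          rw [ih _ hlt]
          simp
        | false =>
          simp [bPieces, PySem.Chars.join_nil]
      | false =>
        have hop' : bOpener line = false := hop
        simp only [aLoop, hop, Bool.not_false, Bool.false_eq_true, reduceIte, List.nil_append]
        simp only [bParse, hop', Bool.false_eq_true, reduceIte, bPieces, join0_cons]
        rw [ih rest hr]
        simp

-- ===== VERDICT (by name: the statement is the Claim_ definition above) =====
theorem compress_nl_assertion_spec : Claim_equal_compress_nl_assertion := by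
  intro code _
  unfold Spec_compress_nl_assertion compress_nl_assertion compress_nl_assertion_alt
  rw [main_loop (PySem.Chars.splitOn code.toList ['\n']).length _ le_rfl]
  simp
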